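-- pv_equiv track=rewrite | github.com/chokwonsik/algorithm | 청소년IT경시대회/1회/백준(30089)_새로문문자열만들기.py | solve
-- ===== SOURCE A (Python) =====
-- def solve(S):
--     for i in range(len(S)):
--         if S[i:] == S[i:][::-1]:
--             if i == 0:
--                 break
--             S += S[i - 1:: -1]
--             break
--     return S
-- ===== SOURCE B (Python) =====
-- def solve(S):
--     # Peel characters off the front until what remains is a palindrome,
--     # then wrap the peeled prefix around that palindromic core.
--     pre = []
--     T = S
--     while T != T[::-1]:
--         pre.append(T[0])
--         T = T[1:]
--     p = ''.join(pre)
--     return p + T + p[::-1]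
-- ===== Notes on version B (the rewrite author's own statement) =====
-- stated objective: alternative
-- what changed: Instead of scanning an index i and appending the reversed slice S[i-1::-1], B peels characters off the front until the remainder is a palindrome and builds the answer as peeled-prefix + palindromic core + reversed peeled-prefix, with no index arithmetic or special case for i == 0.
import Mathlib
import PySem

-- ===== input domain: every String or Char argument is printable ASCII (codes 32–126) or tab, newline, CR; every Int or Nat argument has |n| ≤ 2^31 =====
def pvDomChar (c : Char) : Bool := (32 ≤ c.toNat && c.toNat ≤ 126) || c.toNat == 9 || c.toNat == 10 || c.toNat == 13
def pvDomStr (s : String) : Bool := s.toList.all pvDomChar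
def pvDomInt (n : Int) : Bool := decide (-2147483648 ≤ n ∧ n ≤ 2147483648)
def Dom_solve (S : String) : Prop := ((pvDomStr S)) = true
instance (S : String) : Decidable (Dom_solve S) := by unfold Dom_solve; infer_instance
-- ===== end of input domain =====

-- B replaces A's index scan (append reversed slice S[i-1::-1]) by peeling characters off the
-- front until the rest is a palindrome and wrapping the peeled prefix around that core;
-- same cost, different construction (objective: alternative).

-- ===== PORT A =====
-- A's 'for i in range(len(S))' with break, as recursion on i.
-- S[i:] = drop i; S[i:][::-1] = its reverse; S[i-1::-1] = (take i).reverse — exact here since this branch has i ≥ 1.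
def solveGoA (L : List Char) (fuel i : Nat) : List Char :=
  match fuel with
  | 0 => L
  | fuel' + 1 =>
    if i < L.length then
      let suf := L.drop i
      if suf = suf.reverse then
        if i = 0 then L else L ++ (L.take i).reverse
      else solveGoA L fuel' (i + 1)
    else L

def solve (S : String) : String := String.ofList (solveGoA S.toList S.toList.length 0)

-- ===== PORT B =====
-- B's 'while T != T[::-1]: pre.append(T[0]); T = T[1:]' — the loop state is the pair (pre, T).
def solveGoB : List Char → List Char → List Char × List Char
  | pre, [] => (pre, [])          -- '' == ''[::-1]: the loop exits at once on the empty remainder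
  | pre, c :: t =>
    if (c :: t) = (c :: t).reverse then (pre, c :: t)
    else solveGoB (pre ++ [c]) t

-- 'return p + T + p[::-1]'
def solve_alt (S : String) : String :=
  let pt := solveGoB [] S.toList
  String.ofList (pt.1 ++ pt.2 ++ pt.1.reverse)

-- ===== PRECONDITION & SPEC =====
def Spec_solve (S : String) (out : String) : Prop := out = solve_alt S
instance (S : String) (out : String) : Decidable (Spec_solve S out) := by unfold Spec_solve; infer_instance

-- ===== CLAIM (what is proved, stated in full; the proofs are below) =====
def Claim_equal_solve : Prop := ∀ (S : String), Dom_solve S → Spec_solve S (solve S)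

-- ===== LEMMAS AND PROOFS =====

lemma solve_key : ∀ (T pre : List Char), (T = [] → pre = []) →
    solveGoA (pre ++ T) T.length pre.length =
      (solveGoB pre T).1 ++ (solveGoB pre T).2 ++ (solveGoB pre T).1.reverse := by
  intro T
  induction T with
  | nil =>
    intro pre hpre
    have : pre = [] := hpre rfl
    subst this
    simp [solveGoA, solveGoB]
  | cons c t ih =>
    intro pre _hpre
    by_cases hpal : (c :: t) = (c :: t).reverse
    · -- remainder is a palindrome: both sides stop here
      rw [show (c :: t).length = t.length + 1 from rfl, solveGoA, solveGoB]
      have hlt : pre.length < (pre ++ c :: t).length := by simp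
      have hdrop : (pre ++ c :: t).drop pre.length = c :: t := List.drop_left
      have htake : (pre ++ c :: t).take pre.length = pre := List.take_left
      simp only [hlt, if_pos, hdrop, htake, if_pos hpal]
      by_cases hpre0 : pre.length = 0
      · have : pre = [] := List.eq_nil_of_length_eq_zero hpre0
        subst this; simp
      · simp only [if_neg hpre0, List.append_assoc]
    · -- not a palindrome: both sides step
      have ht : t = [] → pre ++ [c] = [] := by
        intro h; subst h; exact absurd (by simp) hpal
      rw [show (c :: t).length = t.length + 1 from rfl, solveGoA, solveGoB]
      have hlt : pre.length < (pre ++ c :: t).length := by simp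
      have hdrop : (pre ++ c :: t).drop pre.length = c :: t := List.drop_left
      simp only [hlt, if_pos, hdrop, if_neg hpal]
      have hL : pre ++ c :: t = (pre ++ [c]) ++ t := by simp
      have hi : pre.length + 1 = (pre ++ [c]).length := by simp
      rw [hL, hi]
      exact ih (pre ++ [c]) ht

-- ===== VERDICT (by name: the statement is the Claim_ definition above) =====
theorem solve_spec : Claim_equal_solve := by
  intro S _hdom
  unfold Spec_solve solve solve_alt
  have h := solve_key S.toList [] (fun _ => rfl)
  simpa using congrArg String.ofList h
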